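-- pv_equiv track=rewrite | github.com/thehalleyyoung/halley-labs | finite-width-phase-diagrams/implementation/src/arch_kernels/pooling_kernel.py | _adaptive_regions
-- ===== SOURCE A (Python) =====
-- def _adaptive_regions(input_size, output_size):
--     """Compute index regions for adaptive pooling."""
--     regions = []
--     for out_r in range(output_size):
--         for out_c in range(output_size):
--             r_start = (out_r * input_size) // output_size
--             r_end = ((out_r + 1) * input_size) // output_size
--             c_start = (out_c * input_size) // output_size
--             c_end = ((out_c + 1) * input_size) // output_size
--             indices = []
--             for r in range(r_start, r_end):
--                 for c in range(c_start, c_end):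
--                     indices.append(r * input_size + c)
--             regions.append(indices)
--     return regions
-- ===== SOURCE B (Python) =====
-- def _adaptive_regions(input_size, output_size):
--     """Compute index regions for adaptive pooling (inverse map: scatter each input index into its owning bucket)."""
--     if output_size <= 0:
--         return []
--     buckets = [[] for _ in range(output_size * output_size)]
--     for r in range(input_size):
--         row_base = ((r + 1) * output_size - 1) // input_size * output_size
--         for c in range(input_size):
--             col = ((c + 1) * output_size - 1) // input_size
--             buckets[row_base + col].append(r * input_size + c)
--     return buckets
-- ===== Notes on version B (the rewrite author's own statement) =====
-- stated objective: alternative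
-- what changed: B inverts the mapping: instead of enumerating each output cell and re-deriving its input block with four floor divisions per cell, it makes one scan over the input grid, computes for each input cell the output bucket that owns it via the inverse band formula ((p+1)*output_size-1)//input_size, and scatters the flat index into a preallocated bucket table.
import Mathlib
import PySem

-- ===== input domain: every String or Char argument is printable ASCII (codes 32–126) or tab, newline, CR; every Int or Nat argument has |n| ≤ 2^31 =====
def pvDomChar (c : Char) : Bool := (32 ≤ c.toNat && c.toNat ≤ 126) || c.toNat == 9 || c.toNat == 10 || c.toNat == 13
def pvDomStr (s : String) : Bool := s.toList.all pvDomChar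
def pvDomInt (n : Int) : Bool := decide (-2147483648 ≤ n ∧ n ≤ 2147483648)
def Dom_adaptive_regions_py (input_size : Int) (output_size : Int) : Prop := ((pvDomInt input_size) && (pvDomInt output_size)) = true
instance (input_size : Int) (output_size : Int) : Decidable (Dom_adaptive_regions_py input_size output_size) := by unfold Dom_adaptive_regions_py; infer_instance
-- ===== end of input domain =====

-- B inverts the mapping: instead of enumerating each output cell and re-deriving its input block,
-- it makes one scan over the input grid, computing for each input cell the output bucket that owns it
-- and scattering the flat index into a preallocated bucket table (objective: alternative).
-- ===== PORT A =====
def adaptive_regions_py (input_size : Int) (output_size : Int) : List (List Int) :=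
  (PySem.List.pyRange 0 output_size 1).foldl (fun regions out_r =>
    (PySem.List.pyRange 0 output_size 1).foldl (fun regions out_c =>
      let r_start := PySem.Int.floordiv (out_r * input_size) output_size
      let r_end := PySem.Int.floordiv ((out_r + 1) * input_size) output_size
      let c_start := PySem.Int.floordiv (out_c * input_size) output_size
      let c_end := PySem.Int.floordiv ((out_c + 1) * input_size) output_size
      let indices :=
        (PySem.List.pyRange r_start r_end 1).foldl (fun indices r =>
          (PySem.List.pyRange c_start c_end 1).foldl (fun indices c =>
            indices ++ [r * input_size + c]) indices) []
      regions ++ [indices]) regions) []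

-- ===== PORT B =====
-- buckets[i].append(v); on every reachable call 0 ≤ i < bs.length, where Python indexing and
-- set/getD agree (Python would raise IndexError otherwise; it never does here).
def pvScatter (bs : List (List Int)) (i : Int) (v : Int) : List (List Int) :=
  bs.set i.toNat (bs.getD i.toNat [] ++ [v])

def adaptive_regions_py_alt (input_size : Int) (output_size : Int) : List (List Int) :=
  if output_size ≤ 0 then []
  else
    (PySem.List.pyRange 0 input_size 1).foldl (fun buckets r =>
      let row_base := PySem.Int.floordiv ((r + 1) * output_size - 1) input_size * output_size
      (PySem.List.pyRange 0 input_size 1).foldl (fun buckets c =>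
        pvScatter buckets
          (row_base + PySem.Int.floordiv ((c + 1) * output_size - 1) input_size)
          (r * input_size + c)) buckets)
      (List.replicate (output_size * output_size).toNat [])

-- ===== PRECONDITION & SPEC =====
def Spec_adaptive_regions_py (input_size : Int) (output_size : Int) (out : List (List Int)) : Prop := out = adaptive_regions_py_alt input_size output_size
instance (input_size : Int) (output_size : Int) (out : List (List Int)) : Decidable (Spec_adaptive_regions_py input_size output_size out) := by unfold Spec_adaptive_regions_py; infer_instance

-- ===== CLAIM (what is proved, stated in full; the proofs are below) =====
def Claim_equal_adaptive_regions_py : Prop := ∀ (input_size : Int) (output_size : Int), Dom_adaptive_regions_py input_size output_size → Spec_adaptive_regions_py input_size output_size (adaptive_regions_py input_size output_size)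

-- ===== LEMMAS AND PROOFS =====

-- the output band owning input position p (B's inverse map), and A's (start,end) bounds
def pvBand (n g p : Int) : Int := PySem.Int.floordiv ((p + 1) * g - 1) n
def pvLo (n g k : Int) : Int := PySem.Int.floordiv (k * n) g
def pvHi (n g k : Int) : Int := PySem.Int.floordiv ((k + 1) * n) g
def pvReg (n g a b : Int) : List Int :=
  (PySem.List.pyRange (pvLo n g a) (pvHi n g a) 1).flatMap (fun r =>
    (PySem.List.pyRange (pvLo n g b) (pvHi n g b) 1).map (fun c => r * n + c))
def pvPairs (n : Int) : List (Int × Int) :=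
  (PySem.List.pyRange 0 n 1).flatMap (fun r => (PySem.List.pyRange 0 n 1).map (fun c => (r, c)))

-- band characterization: pvBand p = k iff p lies in A's [pvLo k, pvHi k) block
lemma pvBand_eq_iff (n g p k : Int) (hn : 0 < n) (hg : 0 < g) :
    pvBand n g p = k ↔ pvLo n g k ≤ p ∧ p < pvHi n g k := by
  unfold pvBand pvLo pvHi
  rw [PySem.Int.floordiv_eq_iff_of_pos hn,
    show (PySem.Int.floordiv (k * n) g ≤ p ↔ PySem.Int.floordiv (k * n) g < p + 1) from by omega,
    PySem.Int.floordiv_lt_iff_lt_mul hg,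
    show (p < PySem.Int.floordiv ((k + 1) * n) g ↔ p + 1 ≤ PySem.Int.floordiv ((k + 1) * n) g)
      from by omega,
    PySem.Int.le_floordiv_iff_mul_le hg,
    show (k + 1) * n = k * n + n from by ring]
  generalize k * n = A
  generalize (p + 1) * g = B
  omega

lemma pvBand_bounds (n g p : Int) (hg : 0 < g) (hp0 : 0 ≤ p) (hpn : p < n) :
    0 ≤ pvBand n g p ∧ pvBand n g p < g := by
  have hn : 0 < n := by omega
  unfold pvBand
  constructor
  · rw [show (0 ≤ PySem.Int.floordiv ((p + 1) * g - 1) n ↔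
        ¬ PySem.Int.floordiv ((p + 1) * g - 1) n < 0) from by omega,
      PySem.Int.floordiv_lt_iff_lt_mul hn]
    have h1 : 1 * 1 ≤ (p + 1) * g := mul_le_mul (by omega) (by omega) (by omega) (by omega)
    omega
  · rw [PySem.Int.floordiv_lt_iff_lt_mul hn]
    have h1 : (p + 1) * g ≤ n * g := mul_le_mul_of_nonneg_right (by omega) (by omega)
    have h2 : n * g = g * n := by ring
    omega

-- filtering the input axis by band = k recovers A's contiguous block
lemma pvFilter_band (n g k : Int) (hg : 0 < g) (hk : 0 ≤ k) (hk' : k < g) :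
    (PySem.List.pyRange 0 n 1).filter (fun p => pvBand n g p = k) =
      PySem.List.pyRange (pvLo n g k) (pvHi n g k) 1 := by
  by_cases hn : 0 < n
  · -- both sides are strictly increasing lists with the same members
    have hlo : 0 ≤ pvLo n g k := by
      unfold pvLo
      rw [show (0 ≤ PySem.Int.floordiv (k * n) g ↔ ¬ PySem.Int.floordiv (k * n) g < 0)
        from by omega, PySem.Int.floordiv_lt_iff_lt_mul hg]
      have : 0 ≤ k * n := mul_nonneg hk (by omega)
      omega
    have hhi : pvHi n g k ≤ n := by
      unfold pvHi
      rw [show (PySem.Int.floordiv ((k + 1) * n) g ≤ n ↔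
          PySem.Int.floordiv ((k + 1) * n) g < n + 1) from by omega,
        PySem.Int.floordiv_lt_iff_lt_mul hg]
      have h1 : (k + 1) * n ≤ g * n := mul_le_mul_of_nonneg_right (by omega) (by omega)
      have h2 : (n + 1) * g = g * n + g := by ring
      omega
    have hmem : ∀ x : Int, x ∈ (PySem.List.pyRange 0 n 1).filter (fun p => pvBand n g p = k) ↔
        x ∈ PySem.List.pyRange (pvLo n g k) (pvHi n g k) 1 := by
      intro x
      simp only [List.mem_filter, PySem.List.mem_pyRange_one, decide_eq_true_eq]
      constructor
      · rintro ⟨_, hb⟩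
        exact (pvBand_eq_iff n g x k hn hg).mp hb
      · intro hx
        refine ⟨⟨by omega, by omega⟩, (pvBand_eq_iff n g x k hn hg).mpr hx⟩
    have hnd : ((PySem.List.pyRange 0 n 1).filter (fun p => pvBand n g p = k)).Pairwise (· < ·) :=
      (PySem.List.pairwise_lt_pyRange_one 0 n).filter _
    calc (PySem.List.pyRange 0 n 1).filter (fun p => pvBand n g p = k)
        = PySem.List.sorted ((PySem.List.pyRange 0 n 1).filter (fun p => pvBand n g p = k))
            (fun x => x) := (PySem.List.sorted_eq_self_of_pairwise _ _
              (hnd.imp (fun h => le_of_lt h))).symm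
      _ = PySem.List.pyRange (pvLo n g k) (pvHi n g k) 1 := by
          apply PySem.List.sorted_eq_of_perm_of_pairwise_lt
          · exact ((List.perm_ext_iff_of_nodup (PySem.List.nodup_pyRange_one _ _)
              ((PySem.List.nodup_pyRange_one 0 n).filter _)).mpr
              (fun a => (hmem a).symm))
          · exact PySem.List.pairwise_lt_pyRange_one _ _
  · -- n ≤ 0: both sides empty
    rw [PySem.List.pyRange_one_eq_nil (by omega : n ≤ (0:Int)), List.filter_nil]
    rw [PySem.List.pyRange_one_eq_nil]
    unfold pvLo pvHi
    rw [PySem.Int.floordiv_eq_ediv_of_pos hg, PySem.Int.floordiv_eq_ediv_of_pos hg]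
    exact Int.ediv_le_ediv hg (by nlinarith)

-- generic: a double foldl is a foldl over the row-major pair list
lemma pvFoldl2 {α β σ : Type} (rs : List α) (cs : List β) (step : σ → α → β → σ) (B : σ) :
    rs.foldl (fun s r => cs.foldl (fun s c => step s r c) s) B =
      (rs.flatMap (fun r => cs.map (fun c => (r, c)))).foldl (fun s p => step s p.1 p.2) B := by
  induction rs generalizing B with
  | nil => rfl
  | cons r rs ih =>
    simp only [List.foldl_cons, List.flatMap_cons, List.foldl_append, List.foldl_map]
    exact ih _

-- generic: scattering a list into buckets yields, per bucket, the filtered-then-mapped sublist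
lemma pvFoldl_scatter {α : Type} (xs : List α) (idx : α → Int) (f : α → Int)
    (B : List (List Int)) (h : ∀ x ∈ xs, 0 ≤ idx x ∧ (idx x).toNat < B.length) :
    xs.foldl (fun bs x => pvScatter bs (idx x) (f x)) B =
      (List.range B.length).map (fun i => B.getD i [] ++ (xs.filter (fun x => idx x = (i : Int))).map f) := by
  induction xs generalizing B with
  | nil =>
    simp only [List.foldl_nil, List.filter_nil, List.map_nil, List.append_nil]
    apply List.ext_getElem
    · simp
    · intro i h1 h2
      simp only [List.getElem_map, List.getElem_range]
      exact (List.getD_eq_getElem B [] (by simpa using h2)).symm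
  | cons x xs ih =>
    obtain ⟨hx0, hxl⟩ := h x (List.mem_cons_self)
    have hlen : (pvScatter B (idx x) (f x)).length = B.length := by
      simp [pvScatter]
    rw [List.foldl_cons, ih (pvScatter B (idx x) (f x)) (fun y hy => by
      rw [hlen]; exact h y (List.mem_cons_of_mem _ hy)), hlen]
    apply List.map_congr_left
    intro i hi
    rw [List.mem_range] at hi
    by_cases hij : (idx x) = (i : Int)
    · have hj : (idx x).toNat = i := by omega
      rw [show List.filter (fun y => decide (idx y = (i : Int))) (x :: xs) =
          x :: List.filter (fun y => decide (idx y = (i : Int))) xs from by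
            simp [hij]]
      rw [List.getD_eq_getElem _ [] (by rw [hlen]; exact hi),
        show (pvScatter B (idx x) (f x))[i]'(by rw [hlen]; exact hi) =
          B.getD i [] ++ [f x] from by
            simp only [pvScatter, hj]
            exact List.getElem_set_self _]
      simp
    · rw [show List.filter (fun y => decide (idx y = (i : Int))) (x :: xs) =
          List.filter (fun y => decide (idx y = (i : Int))) xs from by
            simp [hij]]
      congr 1
      rw [List.getD_eq_getElem _ [] (by rw [hlen]; exact hi),
        List.getD_eq_getElem _ [] hi]
      exact List.getElem_set_ne (by omega) _

-- a flatMap whose body is guarded by a condition is a filter followed by a flatMap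
lemma pvFlatMap_ite {α β : Type} (xs : List α) (p : α → Prop) [DecidablePred p] (f : α → List β) :
    xs.flatMap (fun x => if p x then f x else []) = (xs.filter (fun x => p x)).flatMap f := by
  induction xs with
  | nil => rfl
  | cons x xs ih => by_cases h : p x <;> simp [h, ih]

-- per-bucket contents equal A's region
lemma pvBucketEq (n g a b : Int) (hg : 0 < g) (ha : 0 ≤ a) (ha' : a < g) (hb : 0 ≤ b) (hb' : b < g) :
    ((pvPairs n).filter (fun p => pvBand n g p.1 * g + pvBand n g p.2 = a * g + b)).map
        (fun p => p.1 * n + p.2) = pvReg n g a b := by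
  by_cases hn : 0 < n
  · unfold pvPairs pvReg
    rw [List.filter_flatMap]
    simp only [List.filter_map, List.map_flatMap, List.map_map]
    rw [List.flatMap_congr (g := fun r => if pvBand n g r = a then
        (PySem.List.pyRange (pvLo n g b) (pvHi n g b) 1).map (fun c => r * n + c) else [])
      (fun r hr => by
        rw [PySem.List.mem_pyRange_one] at hr
        obtain ⟨hbr0, hbr1⟩ := pvBand_bounds n g r hg hr.1 hr.2
        simp only [Function.comp_def]
        by_cases hra : pvBand n g r = a
        · rw [if_pos hra,
            List.filter_congr (q := fun c => decide (pvBand n g c = b)) (fun c hc => by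
              simp only [decide_eq_decide, hra]
              omega),
            pvFilter_band n g b hg hb hb']
        · rw [if_neg hra,
            List.filter_eq_nil_iff.mpr (fun c hc => by
              rw [PySem.List.mem_pyRange_one] at hc
              obtain ⟨hbc0, hbc1⟩ := pvBand_bounds n g c hg hc.1 hc.2
              simp only [decide_eq_true_eq]
              intro heq
              rcases lt_or_gt_of_ne hra with hlt | hgt
              · have h1 : pvBand n g r * g ≤ (a - 1) * g :=
                  mul_le_mul_of_nonneg_right (by omega) (by omega)
                have h2 : (a - 1) * g = a * g - g := by ring
                omega
              · have h1 : (a + 1) * g ≤ pvBand n g r * g :=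
                  mul_le_mul_of_nonneg_right (by omega) (by omega)
                have h2 : (a + 1) * g = a * g + g := by ring
                omega)]
          simp)]
    rw [pvFlatMap_ite, pvFilter_band n g a hg ha ha']
  · have hpairs : PySem.List.pyRange 0 n 1 = [] :=
      PySem.List.pyRange_one_eq_nil (by omega)
    have hrows : PySem.List.pyRange (pvLo n g a) (pvHi n g a) 1 = [] := by
      apply PySem.List.pyRange_one_eq_nil
      unfold pvLo pvHi
      rw [PySem.Int.floordiv_eq_ediv_of_pos hg, PySem.Int.floordiv_eq_ediv_of_pos hg]
      exact Int.ediv_le_ediv hg (by nlinarith)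
    unfold pvPairs pvReg
    rw [hpairs, hrows]
    simp

-- index decomposition of range (G*G)
lemma pvRangeMul (G : Nat) :
    ∀ k : Nat, List.range (k * G) =
      (List.range k).flatMap (fun a => (List.range G).map (fun b => a * G + b)) := by
  intro k
  induction k with
  | zero => simp
  | succ k ih =>
    rw [Nat.succ_mul, List.range_add, List.range_succ, List.flatMap_append, ih,
      List.flatMap_singleton]

-- A in normal form
lemma pvA_eq (n g : Int) :
    adaptive_regions_py n g =
      (PySem.List.pyRange 0 g 1).flatMap (fun a =>
        (PySem.List.pyRange 0 g 1).map (fun b => pvReg n g a b)) := by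
  unfold adaptive_regions_py pvReg pvLo pvHi
  simp only [PySem.List.foldl_append_singleton_eq_map, PySem.List.foldl_append_eq_flatMap,
    List.nil_append]

-- ===== VERDICT (by name: the statement is the Claim_ definition above) =====
theorem adaptive_regions_py_spec : Claim_equal_adaptive_regions_py := by
  intro n g _
  unfold Spec_adaptive_regions_py
  by_cases hg0 : g ≤ 0
  · unfold adaptive_regions_py adaptive_regions_py_alt
    rw [if_pos hg0, PySem.List.pyRange_one_eq_nil hg0]
    rfl
  · have hg : 0 < g := by omega
    -- B as a fold over the row-major pair list
    have hB : adaptive_regions_py_alt n g =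
        (pvPairs n).foldl (fun bs p =>
          pvScatter bs (pvBand n g p.1 * g + pvBand n g p.2) (p.1 * n + p.2))
          (List.replicate (g * g).toNat []) := by
      unfold adaptive_regions_py_alt pvPairs pvBand
      rw [if_neg hg0]
      exact pvFoldl2 _ _ _ _
    have hidx : ∀ p ∈ pvPairs n, 0 ≤ pvBand n g p.1 * g + pvBand n g p.2 ∧
        (pvBand n g p.1 * g + pvBand n g p.2).toNat <
          (List.replicate (g * g).toNat ([] : List Int)).length := by
      intro p hp
      unfold pvPairs at hp
      simp only [List.mem_flatMap, List.mem_map] at hp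
      obtain ⟨r, hr, c, hc, rfl⟩ := hp
      rw [PySem.List.mem_pyRange_one] at hr hc
      dsimp only
      obtain ⟨h1, h2⟩ := pvBand_bounds n g r hg hr.1 hr.2
      obtain ⟨h3, h4⟩ := pvBand_bounds n g c hg hc.1 hc.2
      have h5 : pvBand n g r * g ≤ (g - 1) * g :=
        mul_le_mul_of_nonneg_right (by omega) (by omega)
      have h6 : (g - 1) * g = g * g - g := by ring
      have h7 : 0 ≤ pvBand n g r * g := mul_nonneg h1 (by omega)
      simp only [List.length_replicate]
      omega
    rw [hB, pvFoldl_scatter _ _ _ _ hidx, pvA_eq]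
    simp only [List.length_replicate]
    -- decompose the flat range into the two output axes
    have hN : (g * g).toNat = g.toNat * g.toNat := by
      rw [show g = (g.toNat : Int) from by omega, ← Nat.cast_mul, Int.toNat_natCast,
        Int.toNat_natCast]
    rw [hN, pvRangeMul g.toNat g.toNat]
    simp only [List.map_flatMap, List.map_map, Function.comp_def]
    rw [PySem.List.pyRange_one 0 g]
    simp only [List.flatMap_map, List.map_map, Function.comp_def, zero_add, Int.sub_zero]
    apply List.flatMap_congr
    intro a ha
    rw [List.mem_range] at ha
    apply List.map_congr_left
    intro b hb
    rw [List.mem_range] at hb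
    rw [show ((a * g.toNat + b : Nat) : Int) = (a : Int) * g + (b : Int) from by
      push_cast
      rw [show ((g.toNat : Int)) = g from by omega]]
    have hab : a * g.toNat + b < g.toNat * g.toNat := by
      have h5 : (a + 1) * g.toNat ≤ g.toNat * g.toNat :=
        Nat.mul_le_mul_right _ (by omega)
      have h6 : (a + 1) * g.toNat = a * g.toNat + g.toNat := by ring
      omega
    rw [show (List.replicate (g.toNat * g.toNat) ([] : List Int)).getD (a * g.toNat + b) []
        = [] from by rw [List.getD_eq_getElem _ _ (by simpa using hab)]; simp,
      List.nil_append]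
    exact (pvBucketEq n g (a : Int) (b : Int) hg (by omega) (by omega) (by omega)
      (by omega)).symm
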